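-- pv_equiv track=rewrite | github.com/vitormbispo/fundamentos-algoritmos | Outros exercícios/cria_lista.py | matriz_pos
-- ===== SOURCE A (Python) =====
-- def tem_positivo(lis:list[int],i:int = 0):
--     if lis != []:
--         if i >= len(lis)-1:
--             pos = lis[i] > 0
--         else:
--             if lis[i] > 0:
--                 pos = True
--             else:
--                 pos = tem_positivo(lis,i+1)
--
--     else:
--         pos = False
--
--     return pos
--
-- def matriz_pos(m:list[list[int]],i:int = 0):
--     if m != []:
--         if i >= len(m) -1:
--             pos = tem_positivo(m[i])
--         else:
--             if tem_positivo(m[i]):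
--                 pos = matriz_pos(m,i+1)
--             else:
--                 pos = False
--     else:
--         pos = False
--     return pos
-- ===== SOURCE B (Python) =====
-- def matriz_pos(m, i=0):
--     return m != [] and all(any(x > 0 for x in row) for row in m[i:])
-- ===== Notes on version B (the rewrite author's own statement) =====
-- stated objective: simpler
-- what changed: Replaced the pair of mutually indexed recursions with a single expression: an emptiness guard plus all(any(x > 0 for x in row) for row in m[i:]).
-- outside the precondition, e.g. on matriz_pos([[-1], [1]], -1): A returns False, B returns True
import Mathlib
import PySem

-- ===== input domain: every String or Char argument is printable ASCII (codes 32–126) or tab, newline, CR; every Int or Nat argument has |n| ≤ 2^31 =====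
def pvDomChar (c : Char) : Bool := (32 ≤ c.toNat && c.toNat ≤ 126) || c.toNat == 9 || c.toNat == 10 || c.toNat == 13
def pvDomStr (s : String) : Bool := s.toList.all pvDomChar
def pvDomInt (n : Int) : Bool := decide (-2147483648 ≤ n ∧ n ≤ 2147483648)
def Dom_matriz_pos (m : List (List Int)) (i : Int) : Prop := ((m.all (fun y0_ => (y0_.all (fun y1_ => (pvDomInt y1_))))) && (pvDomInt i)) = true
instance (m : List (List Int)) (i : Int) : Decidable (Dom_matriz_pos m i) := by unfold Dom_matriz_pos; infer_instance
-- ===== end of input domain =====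

-- B replaces A's two mutually indexed recursions with a single guarded all/any expression (objective: simpler).

-- ===== PORT A =====
def tem_positivo (lis : List Int) (i : Int) : Bool :=
  if lis ≠ [] then
    if _h : i ≥ (lis.length : Int) - 1 then
      decide ((PySem.List.pyGet? lis i).getD 0 > 0)   -- lis[i]; Pre_ keeps the index in range, so getD's default is never the value
    else
      if (PySem.List.pyGet? lis i).getD 0 > 0 then true
      else tem_positivo lis (i + 1)
  else false
termination_by ((lis.length : Int) - i).toNat
decreasing_by omega

def matriz_pos (m : List (List Int)) (i : Int) : Bool :=
  if m ≠ [] then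
    if _h : i ≥ (m.length : Int) - 1 then
      tem_positivo ((PySem.List.pyGet? m i).getD []) 0
    else
      if tem_positivo ((PySem.List.pyGet? m i).getD []) 0 then matriz_pos m (i + 1)
      else false
  else false
termination_by ((m.length : Int) - i).toNat
decreasing_by omega

-- ===== PORT B =====
def matriz_pos_alt (m : List (List Int)) (i : Int) : Bool :=
  decide (m ≠ []) && (PySem.List.slice m (some i) none).all (fun row => row.any (fun x => decide (x > 0)))

-- ===== PRECONDITION & SPEC =====
-- Pre_ excludes negative i (Python negative-index wraparound, outside the function's natural domain of
-- row indices) and, for nonempty m, i ≥ len(m), where A raises IndexError.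
def Pre_matriz_pos (m : List (List Int)) (i : Int) : Prop :=
  0 ≤ i ∧ (m = [] ∨ i < (m.length : Int))
instance (m : List (List Int)) (i : Int) : Decidable (Pre_matriz_pos m i) := by unfold Pre_matriz_pos; infer_instance
def pvWitness_matriz_pos : List (List Int) × Int := ([[1], [-2, 3]], 0)

def Spec_matriz_pos (m : List (List Int)) (i : Int) (out : Bool) : Prop := out = matriz_pos_alt m i
instance (m : List (List Int)) (i : Int) (out : Bool) : Decidable (Spec_matriz_pos m i out) := by unfold Spec_matriz_pos; infer_instance

-- ===== CLAIM (what is proved, stated in full; the proofs are below) =====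
def Claim_equal_matriz_pos : Prop := ∀ (m : List (List Int)) (i : Int), Dom_matriz_pos m i → Pre_matriz_pos m i → Spec_matriz_pos m i (matriz_pos m i)

-- ===== LEMMAS AND PROOFS =====

-- A's inner recursion scans lis[i:] for a positive element.
lemma tem_spec (k : Nat) : ∀ (lis : List Int) (i : Int), 0 ≤ i → i < (lis.length : Int) →
    lis.length - i.toNat ≤ k →
    tem_positivo lis i = (lis.drop i.toNat).any (fun x => decide (x > 0)) := by
  induction k with
  | zero => intro lis i h0 h1 hk; omega
  | succ k ih =>
    intro lis i h0 h1 hk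
    have hne : lis ≠ [] := by intro h; subst h; simp at h1; omega
    have hlt : i.toNat < lis.length := by omega
    have hget : PySem.List.pyGet? lis i = some lis[i.toNat] := by
      conv_lhs => rw [show i = ((i.toNat : Nat) : Int) by omega]
      rw [PySem.List.pyGet?_natCast, List.getElem?_eq_getElem hlt]
    rw [tem_positivo, if_pos hne, List.drop_eq_getElem_cons hlt, List.any_cons]
    by_cases hb : i ≥ (lis.length : Int) - 1
    · have hdrop : lis.drop (i.toNat + 1) = [] := by
        apply List.drop_eq_nil_of_le; omega
      rw [dif_pos hb, hget, hdrop]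
      simp
    · rw [dif_neg hb, hget]
      simp only [Option.getD_some]
      by_cases hp : lis[i.toNat] > 0
      · simp [hp]
      · have hrec := ih lis (i + 1) (by omega) (by omega) (by omega)
        have ht : (i + 1).toNat = i.toNat + 1 := by omega
        rw [if_neg hp, hrec, ht]
        simp [hp]

lemma tem_zero (row : List Int) : tem_positivo row 0 = row.any (fun x => decide (x > 0)) := by
  cases row with
  | nil => rw [tem_positivo]; simp
  | cons a l => exact tem_spec (l.length + 1) (a :: l) 0 (by omega) (by simp) (by simp)

-- A's outer recursion checks every row of m[i:].
lemma matriz_spec (k : Nat) : ∀ (m : List (List Int)) (i : Int), 0 ≤ i → i < (m.length : Int) →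
    m.length - i.toNat ≤ k →
    matriz_pos m i = (m.drop i.toNat).all (fun row => row.any (fun x => decide (x > 0))) := by
  induction k with
  | zero => intro m i h0 h1 hk; omega
  | succ k ih =>
    intro m i h0 h1 hk
    have hne : m ≠ [] := by intro h; subst h; simp at h1; omega
    have hlt : i.toNat < m.length := by omega
    have hget : PySem.List.pyGet? m i = some m[i.toNat] := by
      conv_lhs => rw [show i = ((i.toNat : Nat) : Int) by omega]
      rw [PySem.List.pyGet?_natCast, List.getElem?_eq_getElem hlt]
    rw [matriz_pos, if_pos hne, List.drop_eq_getElem_cons hlt, List.all_cons]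
    by_cases hb : i ≥ (m.length : Int) - 1
    · have hdrop : m.drop (i.toNat + 1) = [] := by
        apply List.drop_eq_nil_of_le; omega
      rw [dif_pos hb, hget, hdrop]
      simp [tem_zero]
    · rw [dif_neg hb, hget]
      simp only [Option.getD_some, tem_zero]
      by_cases hp : m[i.toNat].any (fun x => decide (x > 0))
      · have hrec := ih m (i + 1) (by omega) (by omega) (by omega)
        have ht : (i + 1).toNat = i.toNat + 1 := by omega
        rw [if_pos hp, hrec, ht]
        simp [hp]
      · rw [if_neg hp]
        simp [hp]

-- ===== VERDICT (by name: the statement is the Claim_ definition above) =====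
theorem matriz_pos_spec : Claim_equal_matriz_pos := by
  intro m i _ hpre
  obtain ⟨h0, hcase⟩ := hpre
  unfold Spec_matriz_pos matriz_pos_alt
  cases hcase with
  | inl h => subst h; rw [matriz_pos]; simp
  | inr h =>
    have hne : m ≠ [] := by intro he; subst he; simp at h; omega
    rw [matriz_spec (m.length) m i h0 h (by omega), PySem.List.slice_from m h0]
    simp [hne]
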